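-- pv_equiv track=rewrite | github.com/romandadkov/Data-Structures-and-Algorithms | Algorithms on Graphs/pa2_graph_decomposition2/strongly_connected.py | dfs
-- ===== SOURCE A (Python) =====
-- def dfs_explore(adj, used, order, x):
--     used[x] = True
--     for vertex in adj[x]:
--         if not used[vertex]:
--             dfs_explore(adj, used, order, vertex)
--     order.append(x)
--
-- def dfs(adj):
--     used = [False] * len(adj)
--     order = []
--     for i in range(len(adj)):
--         if not used[i]:
--             dfs_explore(adj, used, order, i)
--     order.reverse()
--     return order
-- ===== SOURCE B (Python) =====
-- def dfs(adj):
--     n = len(adj)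
--     used = [False] * n
--     order = []
--     for i in range(n):
--         if not used[i]:
--             used[i] = True
--             stack = [(i, 0)]
--             while stack:
--                 x, j = stack[-1]
--                 row = adj[x]
--                 while j < len(row) and used[row[j]]:
--                     j += 1
--                 if j < len(row):
--                     v = row[j]
--                     stack[-1] = (x, j + 1)
--                     used[v] = True
--                     stack.append((v, 0))
--                 else:
--                     stack.pop()
--                     order.append(x)
--     order.reverse()
--     return order
-- ===== Notes on version B (the rewrite author's own statement) =====
-- stated objective: alternative
-- what changed: Replaces the recursive dfs_explore helper with an iterative DFS driven by an explicit stack of (vertex, next-neighbor-index) frames, emitting the same postorder without recursion.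
import Mathlib
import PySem

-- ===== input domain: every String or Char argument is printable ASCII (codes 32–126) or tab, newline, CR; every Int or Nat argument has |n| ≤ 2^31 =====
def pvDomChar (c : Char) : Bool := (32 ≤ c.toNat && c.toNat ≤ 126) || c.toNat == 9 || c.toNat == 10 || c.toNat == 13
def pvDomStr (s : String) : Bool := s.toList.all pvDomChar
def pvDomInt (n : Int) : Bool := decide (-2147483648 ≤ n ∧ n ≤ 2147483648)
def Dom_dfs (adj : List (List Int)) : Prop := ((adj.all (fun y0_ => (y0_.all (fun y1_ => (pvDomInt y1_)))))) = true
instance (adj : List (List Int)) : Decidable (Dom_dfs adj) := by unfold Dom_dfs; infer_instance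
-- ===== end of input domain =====

-- B replaces A's recursive dfs_explore with an iterative DFS over an explicit stack of
-- (vertex, next-neighbor-index) frames; same return value (return-value equivalence: A and B
-- mutate only their own local lists, the argument is never mutated).

-- ===== PORT A =====
-- dfs_explore, literal transliteration; the fuel argument only makes the recursion total in
-- Lean (under Pre_dfs a fuel of len(adj) is never exhausted — the proof shows any fuel
-- ≥ the number of unvisited vertices yields the same result). Indexing used[x], adj[x]
-- is PySem.List.pyGetD / pySetD, exact under Pre_dfs (no IndexError).
def dfsExplore (adj : List (List Int)) : Nat → List Bool → List Int → Int → List Bool × List Int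
  | 0, used, order, _ => (used, order)
  | f + 1, used, order, x =>
    let used1 := PySem.List.pySetD used x true
    let p := (PySem.List.pyGetD adj x []).foldl
      (fun p v => if PySem.List.pyGetD p.1 v false then p else dfsExplore adj f p.1 p.2 v)
      (used1, order)
    (p.1, p.2 ++ [x])

def dfs (adj : List (List Int)) : List Int :=
  let n := adj.length
  let p := (PySem.List.pyRange 0 (n : Int) 1).foldl
    (fun p i => if PySem.List.pyGetD p.1 i false then p else dfsExplore adj n p.1 p.2 i)
    (List.replicate n false, [])
  p.2.reverse

-- ===== PORT B =====
-- the inner `while j < len(row) and used[row[j]]: j += 1` skip loop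
def dfsSkip (used : List Bool) (row : List Int) (j : Nat) : Nat :=
  if h : j < row.length then
    if PySem.List.pyGetD used row[j] false then dfsSkip used row (j + 1) else j
  else j
termination_by row.length - j

-- the outer `while stack:` loop; fuel only makes it total (2*len(adj)+1 is never exhausted
-- under Pre_dfs: each step pops a frame or marks a fresh vertex)
def dfsLoop (adj : List (List Int)) : Nat → List Bool → List Int → List (Int × Nat) → List Bool × List Int
  | _, used, order, [] => (used, order)
  | 0, used, order, _ :: _ => (used, order)
  | f + 1, used, order, (x, j) :: rest =>
    let row := PySem.List.pyGetD adj x []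
    let j' := dfsSkip used row j
    if h : j' < row.length then
      dfsLoop adj f (PySem.List.pySetD used row[j'] true) order ((row[j'], 0) :: (x, j' + 1) :: rest)
    else
      dfsLoop adj f used (order ++ [x]) rest

def dfs_alt (adj : List (List Int)) : List Int :=
  let n := adj.length
  let p := (PySem.List.pyRange 0 (n : Int) 1).foldl
    (fun p i => if PySem.List.pyGetD p.1 i false then p
      else dfsLoop adj (2 * n + 1) (PySem.List.pySetD p.1 i true) p.2 [(i, 0)])
    (List.replicate n false, [])
  p.2.reverse

-- ===== PRECONDITION & SPEC =====
-- Pre_dfs: every neighbour entry is a valid Python index into adj (Python's negative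
-- wrap-around indices included) — exactly the inputs on which A returns (no IndexError).
def Pre_dfs (adj : List (List Int)) : Prop :=
  ∀ row ∈ adj, ∀ v ∈ row, -(adj.length : Int) ≤ v ∧ v < (adj.length : Int)
instance (adj : List (List Int)) : Decidable (Pre_dfs adj) := by unfold Pre_dfs; infer_instance

def pvWitness_dfs : List (List Int) := [[1], [2, -3], [0], []]

def Spec_dfs (adj : List (List Int)) (out : List Int) : Prop := out = dfs_alt adj
instance (adj : List (List Int)) (out : List Int) : Decidable (Spec_dfs adj out) := by unfold Spec_dfs; infer_instance

-- ===== CLAIM (what is proved, stated in full; the proofs are below) =====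
def Claim_equal_dfs : Prop := ∀ (adj : List (List Int)), Dom_dfs adj → Pre_dfs adj → Spec_dfs adj (dfs adj)

-- ===== LEMMAS AND PROOFS =====

-- abbreviations used only by the proofs
def pvRow (adj : List (List Int)) (x : Int) : List Int := PySem.List.pyGetD adj x []

def pvStep (adj : List (List Int)) (f : Nat) (p : List Bool × List Int) (v : Int) : List Bool × List Int :=
  if PySem.List.pyGetD p.1 v false then p else dfsExplore adj f p.1 p.2 v

def pvCF (u : List Bool) : Nat := u.count false

def pvValid (adj : List (List Int)) : Prop :=
  ∀ row ∈ adj, ∀ v ∈ row, PySem.Raise.InRange adj.length v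

def pvStackOK (adj : List (List Int)) (st : List (Int × Nat)) : Prop :=
  ∀ p ∈ st, PySem.Raise.InRange adj.length p.1 ∧ p.2 ≤ (pvRow adj p.1).length

-- resolved index of a valid Python index
lemma pvIdx_exists (n : Nat) (v : Int) (h : PySem.Raise.InRange n v) :
    ∃ k : Nat, PySem.List.pyIdx? n v = some k ∧ k < n := by
  obtain ⟨h1, h2⟩ := h
  unfold PySem.List.pyIdx?
  by_cases hv : 0 ≤ v
  · refine ⟨v.toNat, ?_, ?_⟩ <;> simp [hv] <;> omega
  · refine ⟨n - (-v).toNat, ?_, ?_⟩ <;> simp [hv] <;> omega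

lemma pvGetD_eq (u : List Bool) (v : Int) (k : Nat) (hk : PySem.List.pyIdx? u.length v = some k) :
    PySem.List.pyGetD u v false = u.getD k false := by
  simp [PySem.List.pyGetD, PySem.List.pyGet?, hk, List.getD]

lemma pvSetD_eq (u : List Bool) (v : Int) (k : Nat) (hk : PySem.List.pyIdx? u.length v = some k) :
    PySem.List.pySetD u v true = u.set k true := by
  simp [PySem.List.pySetD, PySem.List.pySet?, hk]

lemma pvCF_le_len (u : List Bool) : pvCF u ≤ u.length := List.count_le_length

lemma pvCF_set_le (u : List Bool) (k : Nat) : pvCF (u.set k true) ≤ pvCF u := by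
  induction u generalizing k with
  | nil => simp [pvCF]
  | cons b t ih =>
    cases k with
    | zero => cases b <;> simp [pvCF, List.count_cons] at * <;> omega
    | succ k =>
      have := ih k
      cases b <;> simp [pvCF, List.count_cons] at * <;> omega

lemma pvCF_set_true (u : List Bool) (k : Nat) (hk : k < u.length) (hf : u.getD k false = false) :
    pvCF (u.set k true) + 1 = pvCF u := by
  induction u generalizing k with
  | nil => simp at hk
  | cons b t ih =>
    cases k with
    | zero => simp [List.getD] at hf; subst hf; simp [pvCF, List.count_cons]
    | succ k =>
      simp at hk
      have := ih k hk (by simpa [List.getD] using hf)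
      cases b <;> simp [pvCF, List.count_cons] at * <;> omega

lemma pvCF_pos (u : List Bool) (k : Nat) (hk : k < u.length) (hf : u.getD k false = false) :
    0 < pvCF u := by
  have := pvCF_set_true u k hk hf
  omega

-- monotonicity of dfsExplore: length preserved, count of unvisited does not grow
lemma pvFoldl_pres {α β : Type} (P : α → Prop) (f : α → β → α)
    (h : ∀ a b, P a → P (f a b)) : ∀ (l : List β) (a : α), P a → P (l.foldl f a) := by
  intro l
  induction l with
  | nil => intro a ha; simpa using ha
  | cons b t ih => intro a ha; exact ih _ (h a b ha)

lemma pvLen_setD (u : List Bool) (v : Int) : (PySem.List.pySetD u v true).length = u.length := by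
  unfold PySem.List.pySetD PySem.List.pySet?
  cases PySem.List.pyIdx? u.length v <;> simp

lemma pvCF_setD_le (u : List Bool) (v : Int) : pvCF (PySem.List.pySetD u v true) ≤ pvCF u := by
  unfold PySem.List.pySetD PySem.List.pySet?
  cases PySem.List.pyIdx? u.length v with
  | none => simp
  | some k => simpa using pvCF_set_le u k

lemma pvExplore_mono (adj : List (List Int)) :
    ∀ (f : Nat) (u : List Bool) (o : List Int) (x : Int),
      (dfsExplore adj f u o x).1.length = u.length ∧ pvCF (dfsExplore adj f u o x).1 ≤ pvCF u := by
  intro f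
  induction f with
  | zero => intro u o x; simp [dfsExplore]
  | succ f ih =>
    intro u o x
    show (let used1 := PySem.List.pySetD u x true
          let p := (PySem.List.pyGetD adj x []).foldl
            (fun p v => if PySem.List.pyGetD p.1 v false then p else dfsExplore adj f p.1 p.2 v)
            (used1, o)
          ((p.1, p.2 ++ [x]) : List Bool × List Int)).1.length = u.length ∧ _
    have h := pvFoldl_pres (fun p : List Bool × List Int =>
        p.1.length = u.length ∧ pvCF p.1 ≤ pvCF u)
      (fun p v => if PySem.List.pyGetD p.1 v false then p else dfsExplore adj f p.1 p.2 v)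
      (by
        intro p v hp
        by_cases hv : PySem.List.pyGetD p.1 v false
        · simpa [hv] using hp
        · have := ih p.1 p.2 v
          simp only [hv]
          exact ⟨this.1.trans hp.1, this.2.trans hp.2⟩)
      (PySem.List.pyGetD adj x [])
      (PySem.List.pySetD u x true, o)
      ⟨pvLen_setD u x, pvCF_setD_le u x⟩
    exact ⟨h.1, h.2⟩

lemma pvFold_mono (adj : List (List Int)) (f : Nat) (l : List Int) (u : List Bool) (o : List Int) :
    (l.foldl (pvStep adj f) (u, o)).1.length = u.length
      ∧ pvCF (l.foldl (pvStep adj f) (u, o)).1 ≤ pvCF u := by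
  exact pvFoldl_pres (fun p : List Bool × List Int => p.1.length = u.length ∧ pvCF p.1 ≤ pvCF u)
    (pvStep adj f)
    (by
      intro p v hp
      unfold pvStep
      by_cases hv : PySem.List.pyGetD p.1 v false
      · simpa [hv] using hp
      · have := pvExplore_mono adj f p.1 p.2 v
        simp only [hv]
        exact ⟨this.1.trans hp.1, this.2.trans hp.2⟩)
    l (u, o) ⟨rfl, le_rfl⟩

-- characterisation of the skip loop
lemma pvSkip_spec (u : List Bool) (row : List Int) :
    ∀ j, j ≤ row.length →
      j ≤ dfsSkip u row j ∧ dfsSkip u row j ≤ row.length ∧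
      (∀ h : dfsSkip u row j < row.length,
        PySem.List.pyGetD u row[dfsSkip u row j] false = false) ∧
      (∀ (adj : List (List Int)) (f : Nat) (o : List Int),
        (row.drop j).foldl (pvStep adj f) (u, o)
          = (row.drop (dfsSkip u row j)).foldl (pvStep adj f) (u, o)) := by
  intro j
  induction hm : row.length - j using Nat.strong_induction_on generalizing j with
  | _ m IH =>
    intro hj
    by_cases h : j < row.length
    · by_cases hg : PySem.List.pyGetD u row[j] false
      · have hstep : dfsSkip u row j = dfsSkip u row (j + 1) := by
          rw [dfsSkip]; simp [h, hg]
        have hrec := IH (row.length - (j + 1)) (by omega) (j + 1) rfl (by omega)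
        refine ⟨?_, ?_, ?_, ?_⟩
        · rw [hstep]; omega
        · rw [hstep]; exact hrec.2.1
        · rw [hstep]; exact hrec.2.2.1
        · intro adj f o
          rw [hstep]
          have hdrop : row.drop j = row[j] :: row.drop (j + 1) :=
            List.drop_eq_getElem_cons h
          rw [hdrop, List.foldl_cons, show pvStep adj f (u, o) row[j] = (u, o) by simp [pvStep, hg]]
          exact hrec.2.2.2 adj f o
      · have hstop : dfsSkip u row j = j := by rw [dfsSkip]; simp [h, hg]
        rw [hstop]
        exact ⟨le_rfl, by omega, fun _ => by simpa using hg, fun _ _ _ => rfl⟩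
    · have hstop : dfsSkip u row j = j := by rw [dfsSkip]; simp [h]
      rw [hstop]
      exact ⟨le_rfl, hj, fun hh => absurd hh (by omega), fun _ _ _ => rfl⟩

lemma pvLoop_nil (adj : List (List Int)) (f : Nat) (u : List Bool) (o : List Int) :
    dfsLoop adj f u o [] = (u, o) := by
  cases f <;> rfl

-- fuel irrelevance for dfsLoop: any fuel ≥ 2·(unvisited count) + (stack size) gives the same result
lemma pvLoop_fuel (adj : List (List Int)) (hV : pvValid adj) :
    ∀ (m : Nat) (u : List Bool) (o : List Int) (st : List (Int × Nat)) (f1 f2 : Nat),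
      u.length = adj.length → pvStackOK adj st →
      2 * pvCF u + st.length ≤ m → 2 * pvCF u + st.length ≤ f1 → 2 * pvCF u + st.length ≤ f2 →
      dfsLoop adj f1 u o st = dfsLoop adj f2 u o st := by
  intro m
  induction m using Nat.strong_induction_on with
  | _ m IH =>
    intro u o st f1 f2 hu hst hm hf1 hf2
    match st with
    | [] => rw [pvLoop_nil, pvLoop_nil]
    | (x, j) :: rest =>
      simp only [List.length_cons] at hm hf1 hf2
      obtain ⟨g1, rfl⟩ : ∃ g1, f1 = g1 + 1 := ⟨f1 - 1, by omega⟩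
      obtain ⟨g2, rfl⟩ : ∃ g2, f2 = g2 + 1 := ⟨f2 - 1, by omega⟩
      have hx := hst (x, j) (List.mem_cons_self ..)
      have hspec := pvSkip_spec u (pvRow adj x) j hx.2
      rw [dfsLoop, dfsLoop]
      simp only [show PySem.List.pyGetD adj x [] = pvRow adj x from rfl]
      by_cases h : dfsSkip u (pvRow adj x) j < (pvRow adj x).length
      · rw [dif_pos h, dif_pos h]
        set v := (pvRow adj x)[dfsSkip u (pvRow adj x) j] with hv
        have hvr : PySem.Raise.InRange adj.length v := by
          have hrowmem : pvRow adj x ∈ adj := PySem.List.pyGetD_mem (xs := adj) (d := []) hx.1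
          exact hV _ hrowmem v (List.getElem_mem _)
        obtain ⟨k, hk, hkn⟩ := pvIdx_exists adj.length v hvr
        have hk' : PySem.List.pyIdx? u.length v = some k := by rw [hu]; exact hk
        have hunused : PySem.List.pyGetD u v false = false := hspec.2.2.1 h
        have hkg : u.getD k false = false := by
          rw [pvGetD_eq u v k hk'] at hunused; exact hunused
        have hcf : pvCF (PySem.List.pySetD u v true) + 1 = pvCF u := by
          rw [pvSetD_eq u v k hk']; exact pvCF_set_true u k (by omega) hkg
        have hstok : pvStackOK adj ((v, 0) :: (x, dfsSkip u (pvRow adj x) j + 1) :: rest) := by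
          intro p hp
          rcases List.mem_cons.mp hp with rfl | hp
          · exact ⟨hvr, Nat.zero_le _⟩
          rcases List.mem_cons.mp hp with rfl | hp
          · refine ⟨hx.1, ?_⟩
            show dfsSkip u (pvRow adj x) j + 1 ≤ (pvRow adj x).length
            omega
          · exact hst _ (List.mem_cons_of_mem _ hp)
        exact IH (m - 1) (by omega) _ o _ g1 g2
          (by rw [pvLen_setD]; exact hu) hstok (by simp only [List.length_cons]; omega)
          (by simp only [List.length_cons]; omega) (by simp only [List.length_cons]; omega)
      · rw [dif_neg h, dif_neg h]
        exact IH (m - 1) (by omega) u (o ++ [x]) rest g1 g2 hu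
          (fun p hp => hst _ (List.mem_cons_of_mem _ hp)) (by omega) (by omega) (by omega)

-- the simulation lemma: one stack frame (x, j) behaves like A's fold over the
-- remaining neighbours of x followed by appending x
lemma pvSim (adj : List (List Int)) (hV : pvValid adj) :
    ∀ (c : Nat) (u : List Bool) (o : List Int) (x : Int) (j : Nat) (rest : List (Int × Nat))
      (fA f1 f2 : Nat),
      u.length = adj.length → PySem.Raise.InRange adj.length x → j ≤ (pvRow adj x).length →
      pvStackOK adj rest → pvCF u = c → c ≤ fA →
      2 * c + rest.length + 1 ≤ f1 → 2 * c + rest.length ≤ f2 →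
      dfsLoop adj f1 u o ((x, j) :: rest)
        = (let p := ((pvRow adj x).drop j).foldl (pvStep adj fA) (u, o)
           dfsLoop adj f2 p.1 (p.2 ++ [x]) rest) := by
  intro c
  induction c using Nat.strong_induction_on with
  | _ c IH =>
    intro u o x j rest fA f1 f2 hu hx hj hst hc hfA hf1 hf2
    obtain ⟨g1, rfl⟩ : ∃ g1, f1 = g1 + 1 := ⟨f1 - 1, by omega⟩
    have hspec := pvSkip_spec u (pvRow adj x) j hj
    rw [dfsLoop]
    simp only [show PySem.List.pyGetD adj x [] = pvRow adj x from rfl]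
    set j' := dfsSkip u (pvRow adj x) j with hj'
    rw [hspec.2.2.2 adj fA o]
    by_cases h : j' < (pvRow adj x).length
    · rw [dif_pos h]
      set v := (pvRow adj x)[j'] with hv
      have hvr : PySem.Raise.InRange adj.length v := by
        have hrowmem : pvRow adj x ∈ adj := PySem.List.pyGetD_mem (xs := adj) (d := []) hx
        exact hV _ hrowmem v (List.getElem_mem _)
      obtain ⟨k, hk, hkn⟩ := pvIdx_exists adj.length v hvr
      have hk' : PySem.List.pyIdx? u.length v = some k := by rw [hu]; exact hk
      have hunused : PySem.List.pyGetD u v false = false := hspec.2.2.1 h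
      have hkg : u.getD k false = false := by
        have := pvGetD_eq u v k hk'
        rw [this] at hunused; simpa using hunused
      have hcf : pvCF (PySem.List.pySetD u v true) + 1 = pvCF u := by
        rw [pvSetD_eq u v k hk']; exact pvCF_set_true u k (by omega) hkg
      have hcpos : 0 < c := by
        have := pvCF_pos u k (by omega) hkg; omega
      obtain ⟨gA, rfl⟩ : ∃ gA, fA = gA + 1 := ⟨fA - 1, by omega⟩
      -- E is the result of A's recursive call on v
      set E := dfsExplore adj (gA + 1) u o v with hE
      have hEexp : E = (let p := (pvRow adj v).foldl (pvStep adj gA) (PySem.List.pySetD u v true, o)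
                        (p.1, p.2 ++ [v])) := by
        rw [hE, dfsExplore]; rfl
      have hstate : ((pvRow adj v).foldl (pvStep adj gA) (PySem.List.pySetD u v true, o)).1 = E.1
          ∧ ((pvRow adj v).foldl (pvStep adj gA) (PySem.List.pySetD u v true, o)).2 ++ [v] = E.2 := by
        refine ⟨?_, ?_⟩ <;> rw [hEexp]
      have hQ := pvFold_mono adj gA (pvRow adj v) (PySem.List.pySetD u v true) o
      have hEc : pvCF E.1 ≤ c - 1 := by
        rw [← hstate.1]; have := hQ.2; omega
      have hElen : E.1.length = adj.length := by
        rw [← hstate.1, hQ.1, pvLen_setD]; exact hu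
      -- first IH application: run the subtree of v
      have h1 := IH (c - 1) (by omega) (PySem.List.pySetD u v true) o v 0
        ((x, j' + 1) :: rest) gA g1 (2 * c + rest.length)
        (by rw [pvLen_setD]; exact hu) hvr (by omega)
        (by
          intro p hp
          rcases List.mem_cons.mp hp with rfl | hp
          · refine ⟨hx, ?_⟩
            show j' + 1 ≤ (pvRow adj x).length
            omega
          · exact hst _ hp)
        (by omega) (by omega)
        (by simp only [List.length_cons]; omega) (by simp only [List.length_cons]; omega)
      simp only [List.drop_zero] at h1
      rw [h1]
      simp only [hstate.1, hstate.2]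
      -- second IH application: finish the frame (x, j'+1)
      have h2 := IH (pvCF E.1) (by omega) E.1 E.2 x (j' + 1) rest
        (gA + 1) (2 * c + rest.length) f2
        hElen hx (by omega) hst rfl (by omega) (by omega) (by omega)
      rw [h2]
      -- A's fold over drop j' is: one explore step on v, then the fold over drop (j'+1)
      have hdrop : (pvRow adj x).drop j' = v :: (pvRow adj x).drop (j' + 1) :=
        List.drop_eq_getElem_cons h
      rw [hdrop]
      simp only [List.foldl_cons,
        show pvStep adj (gA + 1) (u, o) v = E from by simp [pvStep, hunused, hE]]
    · rw [dif_neg h]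
      have hj'' : j' = (pvRow adj x).length := by omega
      rw [hj'', List.drop_length, List.foldl_nil]
      exact pvLoop_fuel adj hV (2 * c + rest.length) u (o ++ [x]) rest g1 f2 hu hst
        (by omega) (by omega) (by omega)

-- the top-level folds of dfs and dfs_alt agree
lemma pvMain_fold (adj : List (List Int)) (hV : pvValid adj) :
    ∀ (l : List Int), (∀ i ∈ l, PySem.Raise.InRange adj.length i) →
      ∀ (u : List Bool) (o : List Int), u.length = adj.length →
      l.foldl (fun p i => if PySem.List.pyGetD p.1 i false then p
          else dfsExplore adj adj.length p.1 p.2 i) (u, o)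
        = l.foldl (fun p i => if PySem.List.pyGetD p.1 i false then p
          else dfsLoop adj (2 * adj.length + 1) (PySem.List.pySetD p.1 i true) p.2 [(i, 0)]) (u, o) := by
  intro l
  induction l with
  | nil => intro _ u o _; rfl
  | cons i t ih =>
    intro hl u o hu
    by_cases hi : PySem.List.pyGetD u i false
    · simp only [List.foldl_cons, hi, if_true]
      exact ih (fun w hw => hl w (List.mem_cons_of_mem _ hw)) u o hu
    · have hir : PySem.Raise.InRange adj.length i := hl i (List.mem_cons_self ..)
      obtain ⟨k, hk, hkn⟩ := pvIdx_exists adj.length i hir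
      have hk' : PySem.List.pyIdx? u.length i = some k := by rw [hu]; exact hk
      have hkg : u.getD k false = false := by
        have := pvGetD_eq u i k hk'
        rw [this] at hi; simpa using hi
      have hcf : pvCF (PySem.List.pySetD u i true) + 1 = pvCF u := by
        rw [pvSetD_eq u i k hk']; exact pvCF_set_true u k (by omega) hkg
      have hcle : pvCF u ≤ adj.length := by
        have := pvCF_le_len u; omega
      have hnpos : 0 < adj.length := by omega
      obtain ⟨n1, hn1⟩ : ∃ n1, adj.length = n1 + 1 := ⟨adj.length - 1, by omega⟩
      set u1 := PySem.List.pySetD u i true with hu1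
      set c := pvCF u1 with hcdef
      -- B's component loop equals A's explore call
      have hS := pvSim adj hV c u1 o i 0 [] n1 (2 * adj.length + 1) (2 * c)
        (by rw [hu1, pvLen_setD]; exact hu) hir (by omega) (by intro p hp; simp at hp)
        rfl (by omega) (by simp; omega) (by simp)
      simp only [List.drop_zero] at hS
      have hloopnil : ∀ (p : List Bool × List Int),
          dfsLoop adj (2 * c) p.1 (p.2 ++ [i]) [] = (p.1, p.2 ++ [i]) := by
        intro p; rw [pvLoop_nil]
      have hexp : dfsExplore adj adj.length u o i
          = (let p := (pvRow adj i).foldl (pvStep adj n1) (u1, o)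
             (p.1, p.2 ++ [i])) := by
        rw [hn1, dfsExplore]; rfl
      have hBA : dfsLoop adj (2 * adj.length + 1) u1 o [(i, 0)]
          = dfsExplore adj adj.length u o i := by
        rw [hS, hexp]
        exact hloopnil _
      simp only [List.foldl_cons, hi]
      rw [hBA]
      have hE := pvExplore_mono adj adj.length u o i
      exact ih (fun w hw => hl w (List.mem_cons_of_mem _ hw)) _ _ (hE.1.trans hu)

-- ===== VERDICT (by name: the statement is the Claim_ definition above) =====
theorem dfs_spec : Claim_equal_dfs := by
  intro adj _ hPre
  show dfs adj = dfs_alt adj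
  unfold dfs dfs_alt
  simp only
  have hV : pvValid adj := by
    intro row hrow v hv
    exact hPre row hrow v hv
  rw [pvMain_fold adj hV (PySem.List.pyRange 0 (adj.length : Int) 1)
    (by
      intro i hi
      rw [PySem.List.mem_pyRange_one] at hi
      exact ⟨by omega, hi.2⟩)
    (List.replicate adj.length false) []
    (by simp)]
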